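-- pv_equiv track=rewrite | github.com/Khamel83/oos | src/template_engine.py | _extract_features_for_goal
-- ===== SOURCE A (Python) =====
-- from typing import Dict, List, Optional, Any
--
-- def _extract_features_for_goal(goal_type: str, description: str) -> List[str]:
--     """Extract features specific to goal type"""
--     features = []
--
--     if goal_type == 'chatbot':
--         if any(word in description for word in ['knowledge', 'faq', 'information']):
--             features.append('knowledge_base')
--         if any(word in description for word in ['human', 'escalate', 'support']):
--             features.append('human_handoff')
--         if any(word in description for word in ['product', 'catalog']):
--             features.append('product_integration')
--
--     elif goal_type == 'automation':
--         if any(word in description for word in ['web', 'site', 'website']):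
--             features.append('web_scraping')
--         if any(word in description for word in ['email', 'mail']):
--             features.append('email_integration')
--         if any(word in description for word in ['schedule', 'time', 'daily']):
--             features.append('scheduling')
--
--     elif goal_type == 'data_analysis':
--         if any(word in description for word in ['csv', 'excel', 'file']):
--             features.append('file_processing')
--         if any(word in description for word in ['chart', 'visual', 'graph']):
--             features.append('visualization')
--         if any(word in description for word in ['report', 'summary']):
--             features.append('reporting')
--
--     return features
-- ===== SOURCE B (Python) =====
-- # Different algorithm: instead of one substring test per keyword, B makes a single
-- # left-to-right scan over the description, testing at each position which keyword
-- # starts there (prefix test), collecting matched features in a set, and finally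
-- # emits the goal's features in rule order.
-- PAIRS = {
--     'chatbot': [
--         ('knowledge', 'knowledge_base'), ('faq', 'knowledge_base'), ('information', 'knowledge_base'),
--         ('human', 'human_handoff'), ('escalate', 'human_handoff'), ('support', 'human_handoff'),
--         ('product', 'product_integration'), ('catalog', 'product_integration'),
--     ],
--     'automation': [
--         ('web', 'web_scraping'), ('site', 'web_scraping'), ('website', 'web_scraping'),
--         ('email', 'email_integration'), ('mail', 'email_integration'),
--         ('schedule', 'scheduling'), ('time', 'scheduling'), ('daily', 'scheduling'),
--     ],
--     'data_analysis': [
--         ('csv', 'file_processing'), ('excel', 'file_processing'), ('file', 'file_processing'),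
--         ('chart', 'visualization'), ('visual', 'visualization'), ('graph', 'visualization'),
--         ('report', 'reporting'), ('summary', 'reporting'),
--     ],
-- }
-- ORDER = {
--     'chatbot': ['knowledge_base', 'human_handoff', 'product_integration'],
--     'automation': ['web_scraping', 'email_integration', 'scheduling'],
--     'data_analysis': ['file_processing', 'visualization', 'reporting'],
-- }
--
-- def _extract_features_for_goal(goal_type: str, description: str):
--     pairs = PAIRS.get(goal_type, [])
--     matched = set()
--     for i in range(len(description)):
--         for word, feature in pairs:
--             if description[i:].startswith(word):
--                 matched.add(feature)
--     return [f for f in ORDER.get(goal_type, []) if f in matched]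
-- ===== Notes on version B (the rewrite author's own statement) =====
-- stated objective: alternative
-- what changed: B replaces A's per-keyword substring ('in') tests inside an if/elif cascade by a single left-to-right scan of the description that prefix-tests every keyword at each position, accumulating matched features in a set, and finally emits the goal's features in fixed rule order.
import Mathlib
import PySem

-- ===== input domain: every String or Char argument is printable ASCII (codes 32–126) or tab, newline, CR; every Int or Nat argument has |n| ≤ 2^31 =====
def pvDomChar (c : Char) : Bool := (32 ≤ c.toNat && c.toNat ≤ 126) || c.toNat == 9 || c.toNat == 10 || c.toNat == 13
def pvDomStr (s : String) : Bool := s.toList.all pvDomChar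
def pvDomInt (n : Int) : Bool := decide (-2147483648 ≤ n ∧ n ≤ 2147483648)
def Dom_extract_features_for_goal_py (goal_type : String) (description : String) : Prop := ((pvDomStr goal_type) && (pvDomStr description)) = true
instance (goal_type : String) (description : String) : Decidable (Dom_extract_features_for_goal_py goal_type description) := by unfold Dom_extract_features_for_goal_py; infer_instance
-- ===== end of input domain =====

-- B replaces A's per-keyword substring tests by a single positional scan of the description
-- (prefix test per position into a matched set, then features emitted in rule order); alternative, same cost class.

-- ===== PORT A =====
def extract_features_for_goal_py (goal_type : String) (description : String) : List String :=
  let features : List String := []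
  if goal_type == "chatbot" then
    let features := if ["knowledge", "faq", "information"].any (fun word => PySem.Str.isIn word description) then features ++ ["knowledge_base"] else features
    let features := if ["human", "escalate", "support"].any (fun word => PySem.Str.isIn word description) then features ++ ["human_handoff"] else features
    let features := if ["product", "catalog"].any (fun word => PySem.Str.isIn word description) then features ++ ["product_integration"] else features
    features
  else if goal_type == "automation" then
    let features := if ["web", "site", "website"].any (fun word => PySem.Str.isIn word description) then features ++ ["web_scraping"] else features
    let features := if ["email", "mail"].any (fun word => PySem.Str.isIn word description) then features ++ ["email_integration"] else features
    let features := if ["schedule", "time", "daily"].any (fun word => PySem.Str.isIn word description) then features ++ ["scheduling"] else features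
    features
  else if goal_type == "data_analysis" then
    let features := if ["csv", "excel", "file"].any (fun word => PySem.Str.isIn word description) then features ++ ["file_processing"] else features
    let features := if ["chart", "visual", "graph"].any (fun word => PySem.Str.isIn word description) then features ++ ["visualization"] else features
    let features := if ["report", "summary"].any (fun word => PySem.Str.isIn word description) then features ++ ["reporting"] else features
    features
  else features

-- ===== PORT B =====
-- the static PAIRS/ORDER tables of Source B
def pvPairs : PySem.Dict String (List (String × String)) :=
  PySem.Dict.mk
    [("chatbot",
       [("knowledge","knowledge_base"),("faq","knowledge_base"),("information","knowledge_base"),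
        ("human","human_handoff"),("escalate","human_handoff"),("support","human_handoff"),
        ("product","product_integration"),("catalog","product_integration")]),
     ("automation",
       [("web","web_scraping"),("site","web_scraping"),("website","web_scraping"),
        ("email","email_integration"),("mail","email_integration"),
        ("schedule","scheduling"),("time","scheduling"),("daily","scheduling")]),
     ("data_analysis",
       [("csv","file_processing"),("excel","file_processing"),("file","file_processing"),
        ("chart","visualization"),("visual","visualization"),("graph","visualization"),
        ("report","reporting"),("summary","reporting")])]

def pvOrder : PySem.Dict String (List String) :=
  PySem.Dict.mk
    [("chatbot", ["knowledge_base","human_handoff","product_integration"]),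
     ("automation", ["web_scraping","email_integration","scheduling"]),
     ("data_analysis", ["file_processing","visualization","reporting"])]

def extract_features_for_goal_py_alt (goal_type : String) (description : String) : List String :=
  let pairs := PySem.Dict.getD pvPairs goal_type []
  let matched : PySem.Set String :=
    (List.range ((PySem.Str.len description).toNat)).foldl
      (fun m (i : Nat) =>
        pairs.foldl
          (fun m wf =>
            if PySem.Str.startswith (PySem.Str.slice description (some (i : Int)) none) wf.1
            then PySem.Set.add m wf.2 else m)
          m)
      PySem.Set.empty
  (PySem.Dict.getD pvOrder goal_type []).filter (fun f => PySem.Set.contains matched f)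

-- ===== PRECONDITION & SPEC =====
def Spec_extract_features_for_goal_py (goal_type : String) (description : String) (out : List String) : Prop := out = extract_features_for_goal_py_alt goal_type description
instance (goal_type : String) (description : String) (out : List String) : Decidable (Spec_extract_features_for_goal_py goal_type description out) := by unfold Spec_extract_features_for_goal_py; infer_instance

-- ===== CLAIM =====
def Claim_equal_extract_features_for_goal_py : Prop := ∀ (goal_type : String) (description : String), Dom_extract_features_for_goal_py goal_type description → Spec_extract_features_for_goal_py goal_type description (extract_features_for_goal_py goal_type description)

-- ===== LEMMAS AND PROOFS =====

-- the matched set built by B's scan, as a named function for the lemmas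
def pvMatched (d : String) (pairs : List (String × String)) : PySem.Set String :=
  (List.range ((PySem.Str.len d).toNat)).foldl
    (fun m (i : Nat) =>
      pairs.foldl
        (fun m wf =>
          if PySem.Str.startswith (PySem.Str.slice d (some (i : Int)) none) wf.1
          then PySem.Set.add m wf.2 else m)
        m)
    PySem.Set.empty

lemma mem_inner (pairs : List (String × String)) (p : String → Bool) (m : PySem.Set String) (f : String) :
    f ∈ pairs.foldl (fun m wf => if p wf.1 then PySem.Set.add m wf.2 else m) m ↔
      f ∈ m ∨ ∃ wf ∈ pairs, p wf.1 = true ∧ wf.2 = f := by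
  induction pairs generalizing m with
  | nil => simp
  | cons wf rest ih =>
    simp only [List.foldl_cons, ih]
    split_ifs with hp
    · simp only [PySem.Set.mem_add, List.mem_cons]
      constructor
      · rintro ((h | h) | ⟨w, hw, hpw, he⟩)
        · exact Or.inl h
        · exact Or.inr ⟨wf, Or.inl rfl, hp, h.symm⟩
        · exact Or.inr ⟨w, Or.inr hw, hpw, he⟩
      · rintro (h | ⟨w, (rfl | hw), hpw, he⟩)
        · exact Or.inl (Or.inl h)
        · exact Or.inl (Or.inr he.symm)
        · exact Or.inr ⟨w, hw, hpw, he⟩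
    · simp only [List.mem_cons]
      constructor
      · rintro (h | ⟨w, hw, hpw, he⟩)
        · exact Or.inl h
        · exact Or.inr ⟨w, Or.inr hw, hpw, he⟩
      · rintro (h | ⟨w, (rfl | hw), hpw, he⟩)
        · exact Or.inl h
        · exact absurd hpw (by simp [hp])
        · exact Or.inr ⟨w, hw, hpw, he⟩

lemma mem_pvMatched (d : String) (pairs : List (String × String)) (f : String) :
    f ∈ pvMatched d pairs ↔
      ∃ i < (PySem.Str.len d).toNat, ∃ wf ∈ pairs,
        PySem.Str.startswith (PySem.Str.slice d (some (i : Int)) none) wf.1 = true ∧ wf.2 = f := by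
  unfold pvMatched
  generalize (PySem.Str.len d).toNat = n
  induction n with
  | zero => simp [PySem.Set.empty]
  | succ n ih =>
    rw [List.range_succ, List.foldl_append]
    simp only [List.foldl_cons, List.foldl_nil]
    rw [mem_inner, ih]
    constructor
    · rintro (⟨i, hi, h⟩ | ⟨wf, hw, hs, he⟩)
      · exact ⟨i, Nat.lt_succ_of_lt hi, h⟩
      · exact ⟨n, Nat.lt_succ_self n, wf, hw, hs, he⟩
    · rintro ⟨i, hi, h⟩
      rcases Nat.lt_succ_iff_lt_or_eq.mp hi with hi' | rfl
      · exact Or.inl ⟨i, hi', h⟩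
      · exact Or.inr h

lemma exists_start_iff (d w : String) (hw : w.toList ≠ []) :
    (∃ i < (PySem.Str.len d).toNat, PySem.Str.startswith (PySem.Str.slice d (some (i : Int)) none) w = true) ↔
      PySem.Str.isIn w d = true := by
  have hlen : (PySem.Str.len d).toNat = d.toList.length := by
    simp [PySem.Str.len]
  have hsw : ∀ i : Nat, PySem.Str.startswith (PySem.Str.slice d (some (i : Int)) none) w = true ↔
      w.toList <+: d.toList.drop i := by
    intro i
    rw [← PySem.Chars.startswith_iff]
    simp [PySem.List.slice_from_natCast]
  rw [PySem.Str.isIn_eq, ← PySem.Chars.exists_prefix_drop_iff_isIn]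
  constructor
  · rintro ⟨i, _, h⟩
    exact ⟨i, (hsw i).mp h⟩
  · rintro ⟨j, h⟩
    by_cases hj : j < d.toList.length
    · exact ⟨j, by omega, (hsw j).mpr h⟩
    · exfalso
      have hnil : d.toList.drop j = [] := List.drop_eq_nil_of_le (by omega)
      rw [hnil, List.prefix_nil] at h
      exact hw h

lemma contains_pvMatched (d : String) (pairs : List (String × String))
    (hne : ∀ wf ∈ pairs, wf.1.toList ≠ []) (f : String) :
    PySem.Set.contains (pvMatched d pairs) f = true ↔
      ∃ wf ∈ pairs, wf.2 = f ∧ PySem.Str.isIn wf.1 d = true := by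
  rw [PySem.Set.contains_iff, mem_pvMatched]
  constructor
  · rintro ⟨i, hi, wf, hwf, hs, he⟩
    exact ⟨wf, hwf, he, (exists_start_iff d wf.1 (hne wf hwf)).mp ⟨i, hi, hs⟩⟩
  · rintro ⟨wf, hwf, he, hin⟩
    obtain ⟨i, hi, hs⟩ := (exists_start_iff d wf.1 (hne wf hwf)).mpr hin
    exact ⟨i, hi, wf, hwf, hs, he⟩

lemma alt_eq (g d : String) : extract_features_for_goal_py_alt g d =
    (PySem.Dict.getD pvOrder g []).filter
      (fun f => PySem.Set.contains (pvMatched d (PySem.Dict.getD pvPairs g [])) f) := rfl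

-- ===== VERDICT =====
theorem extract_features_for_goal_py_spec : Claim_equal_extract_features_for_goal_py := by
  intro g d _
  unfold Spec_extract_features_for_goal_py
  rw [alt_eq]
  by_cases h1 : g = "chatbot"
  · subst h1
    have hp : PySem.Dict.getD pvPairs "chatbot" [] = ([("knowledge","knowledge_base"),("faq","knowledge_base"),("information","knowledge_base"),("human","human_handoff"),("escalate","human_handoff"),("support","human_handoff"),("product","product_integration"),("catalog","product_integration")] : List (String × String)) := rfl
    have ho : PySem.Dict.getD pvOrder "chatbot" [] = (["knowledge_base","human_handoff","product_integration"] : List String) := rfl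
    rw [hp, ho]
    have hne : ∀ wf ∈ ([("knowledge","knowledge_base"),("faq","knowledge_base"),("information","knowledge_base"),("human","human_handoff"),("escalate","human_handoff"),("support","human_handoff"),("product","product_integration"),("catalog","product_integration")] : List (String × String)), wf.1.toList ≠ [] := by decide
    have f1 : ("knowledge_base" ∈ pvMatched d ([("knowledge","knowledge_base"),("faq","knowledge_base"),("information","knowledge_base"),("human","human_handoff"),("escalate","human_handoff"),("support","human_handoff"),("product","product_integration"),("catalog","product_integration")] : List (String × String))) ↔ (["knowledge", "faq", "information"].any (fun word => PySem.Str.isIn word d) = true) := by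
      rw [← PySem.Set.contains_iff, contains_pvMatched d _ hne]; simp
    have f2 : ("human_handoff" ∈ pvMatched d ([("knowledge","knowledge_base"),("faq","knowledge_base"),("information","knowledge_base"),("human","human_handoff"),("escalate","human_handoff"),("support","human_handoff"),("product","product_integration"),("catalog","product_integration")] : List (String × String))) ↔ (["human", "escalate", "support"].any (fun word => PySem.Str.isIn word d) = true) := by
      rw [← PySem.Set.contains_iff, contains_pvMatched d _ hne]; simp
    have f3 : ("product_integration" ∈ pvMatched d ([("knowledge","knowledge_base"),("faq","knowledge_base"),("information","knowledge_base"),("human","human_handoff"),("escalate","human_handoff"),("support","human_handoff"),("product","product_integration"),("catalog","product_integration")] : List (String × String))) ↔ (["product", "catalog"].any (fun word => PySem.Str.isIn word d) = true) := by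
      rw [← PySem.Set.contains_iff, contains_pvMatched d _ hne]; simp
    unfold extract_features_for_goal_py
    cases hA : (["knowledge", "faq", "information"].any (fun word => PySem.Str.isIn word d)) <;>
          cases hB : (["human", "escalate", "support"].any (fun word => PySem.Str.isIn word d)) <;>
          cases hC : (["product", "catalog"].any (fun word => PySem.Str.isIn word d)) <;>
        simp_all [List.filter]
  · by_cases h2 : g = "automation"
    · subst h2
      have hp : PySem.Dict.getD pvPairs "automation" [] = ([("web","web_scraping"),("site","web_scraping"),("website","web_scraping"),("email","email_integration"),("mail","email_integration"),("schedule","scheduling"),("time","scheduling"),("daily","scheduling")] : List (String × String)) := rfl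
      have ho : PySem.Dict.getD pvOrder "automation" [] = (["web_scraping","email_integration","scheduling"] : List String) := rfl
      rw [hp, ho]
      have hne : ∀ wf ∈ ([("web","web_scraping"),("site","web_scraping"),("website","web_scraping"),("email","email_integration"),("mail","email_integration"),("schedule","scheduling"),("time","scheduling"),("daily","scheduling")] : List (String × String)), wf.1.toList ≠ [] := by decide
      have f1 : ("web_scraping" ∈ pvMatched d ([("web","web_scraping"),("site","web_scraping"),("website","web_scraping"),("email","email_integration"),("mail","email_integration"),("schedule","scheduling"),("time","scheduling"),("daily","scheduling")] : List (String × String))) ↔ (["web", "site", "website"].any (fun word => PySem.Str.isIn word d) = true) := by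
        rw [← PySem.Set.contains_iff, contains_pvMatched d _ hne]; simp
      have f2 : ("email_integration" ∈ pvMatched d ([("web","web_scraping"),("site","web_scraping"),("website","web_scraping"),("email","email_integration"),("mail","email_integration"),("schedule","scheduling"),("time","scheduling"),("daily","scheduling")] : List (String × String))) ↔ (["email", "mail"].any (fun word => PySem.Str.isIn word d) = true) := by
        rw [← PySem.Set.contains_iff, contains_pvMatched d _ hne]; simp
      have f3 : ("scheduling" ∈ pvMatched d ([("web","web_scraping"),("site","web_scraping"),("website","web_scraping"),("email","email_integration"),("mail","email_integration"),("schedule","scheduling"),("time","scheduling"),("daily","scheduling")] : List (String × String))) ↔ (["schedule", "time", "daily"].any (fun word => PySem.Str.isIn word d) = true) := by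
        rw [← PySem.Set.contains_iff, contains_pvMatched d _ hne]; simp
      unfold extract_features_for_goal_py
      cases hA : (["web", "site", "website"].any (fun word => PySem.Str.isIn word d)) <;>
            cases hB : (["email", "mail"].any (fun word => PySem.Str.isIn word d)) <;>
            cases hC : (["schedule", "time", "daily"].any (fun word => PySem.Str.isIn word d)) <;>
          simp_all [List.filter]
    · by_cases h : g = "data_analysis"
      · subst h
        have hp : PySem.Dict.getD pvPairs "data_analysis" [] = ([("csv","file_processing"),("excel","file_processing"),("file","file_processing"),("chart","visualization"),("visual","visualization"),("graph","visualization"),("report","reporting"),("summary","reporting")] : List (String × String)) := rfl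
        have ho : PySem.Dict.getD pvOrder "data_analysis" [] = (["file_processing","visualization","reporting"] : List String) := rfl
        rw [hp, ho]
        have hne : ∀ wf ∈ ([("csv","file_processing"),("excel","file_processing"),("file","file_processing"),("chart","visualization"),("visual","visualization"),("graph","visualization"),("report","reporting"),("summary","reporting")] : List (String × String)), wf.1.toList ≠ [] := by decide
        have f1 : ("file_processing" ∈ pvMatched d ([("csv","file_processing"),("excel","file_processing"),("file","file_processing"),("chart","visualization"),("visual","visualization"),("graph","visualization"),("report","reporting"),("summary","reporting")] : List (String × String))) ↔ (["csv", "excel", "file"].any (fun word => PySem.Str.isIn word d) = true) := by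
          rw [← PySem.Set.contains_iff, contains_pvMatched d _ hne]; simp
        have f2 : ("visualization" ∈ pvMatched d ([("csv","file_processing"),("excel","file_processing"),("file","file_processing"),("chart","visualization"),("visual","visualization"),("graph","visualization"),("report","reporting"),("summary","reporting")] : List (String × String))) ↔ (["chart", "visual", "graph"].any (fun word => PySem.Str.isIn word d) = true) := by
          rw [← PySem.Set.contains_iff, contains_pvMatched d _ hne]; simp
        have f3 : ("reporting" ∈ pvMatched d ([("csv","file_processing"),("excel","file_processing"),("file","file_processing"),("chart","visualization"),("visual","visualization"),("graph","visualization"),("report","reporting"),("summary","reporting")] : List (String × String))) ↔ (["report", "summary"].any (fun word => PySem.Str.isIn word d) = true) := by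
          rw [← PySem.Set.contains_iff, contains_pvMatched d _ hne]; simp
        unfold extract_features_for_goal_py
        cases hA : (["csv", "excel", "file"].any (fun word => PySem.Str.isIn word d)) <;>
              cases hB : (["chart", "visual", "graph"].any (fun word => PySem.Str.isIn word d)) <;>
              cases hC : (["report", "summary"].any (fun word => PySem.Str.isIn word d)) <;>
            simp_all [List.filter]
      · have ho : PySem.Dict.getD pvOrder g [] = [] := by
          have hf1 : ("chatbot" == g) = false := by simp; intro e; exact h1 e.symm
          have hf2 : ("automation" == g) = false := by simp; intro e; exact h2 e.symm
          have hf3 : ("data_analysis" == g) = false := by simp; intro e; exact h e.symm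
          simp [pvOrder, PySem.Dict.getD, PySem.Dict.get?, List.find?, hf1, hf2, hf3]
        rw [ho]
        have hb1 : (g == "chatbot") = false := by simp [h1]
        have hb2 : (g == "automation") = false := by simp [h2]
        have hb3 : (g == "data_analysis") = false := by simp [h]
        unfold extract_features_for_goal_py
        simp [hb1, hb2, hb3]
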